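-- pv_equiv track=rewrite | github.com/KiranBKL/DSACompetitive | Recursion/RopeCutting.py | ropeCut
-- ===== SOURCE A (Python) =====
-- def ropeCut(n):
--     if(n==0):
--         return 0
--     if(n<0):
--         return -1
--     res=max(ropeCut(n-11),max(ropeCut(n-9),ropeCut(n-12)))
--     if(n==-1):
--         return -1
--     return res+1
-- ===== SOURCE B (Python) =====
-- def ropeCut(n):
--     # Bottom-up DP over lengths 0..n (same recurrence as the recursive version,
--     # with dp[m] = -1 for m < 0), replacing the O(3^n) recursion by one O(n) pass.
--     if n < 0:
--         return -1
--     dp = [0]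
--     for i in range(1, n + 1):
--         best = -1
--         for c in (9, 11, 12):
--             if i >= c and dp[i - c] > best:
--                 best = dp[i - c]
--         dp.append(best + 1)
--     return dp[n]
-- ===== Notes on version B (the rewrite author's own statement) =====
-- stated objective: faster
-- what changed: Replaced the exponential triple recursion with a bottom-up dynamic-programming array over lengths 0..n computing the same recurrence in one pass; intended as faster (asymptotic): in a timing run A times out at sizes where B returns in under a millisecond.
import Mathlib
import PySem

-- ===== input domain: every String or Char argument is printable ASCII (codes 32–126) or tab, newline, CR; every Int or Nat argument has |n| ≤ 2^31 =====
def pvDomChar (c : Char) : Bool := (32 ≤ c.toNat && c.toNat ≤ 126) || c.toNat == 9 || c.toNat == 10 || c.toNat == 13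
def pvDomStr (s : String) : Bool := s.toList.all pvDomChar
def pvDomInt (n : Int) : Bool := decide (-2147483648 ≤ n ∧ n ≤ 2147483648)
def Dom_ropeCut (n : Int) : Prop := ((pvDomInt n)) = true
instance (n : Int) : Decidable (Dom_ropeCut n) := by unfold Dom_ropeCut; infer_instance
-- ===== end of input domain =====

-- B replaces A's exponential triple recursion by a bottom-up DP array over lengths 0..n (same recurrence, one pass).

-- ===== PORT A =====
def ropeCut (n : Int) : Int :=
  if n = 0 then 0
  else if n < 0 then -1
  else
    let res := max (ropeCut (n - 11)) (max (ropeCut (n - 9)) (ropeCut (n - 12)))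
    if n = -1 then -1 else res + 1
termination_by n.toNat
decreasing_by all_goals omega

-- ===== PORT B =====
-- inner 'for c in (9, 11, 12): if i >= c and dp[i-c] > best: best = dp[i-c]'
-- (dp[i-c] is always in range when the guard i >= c holds, so pyGetD's default is never used)
def dpBest (dp : List Int) (i : Int) : Int :=
  [(9 : Int), 11, 12].foldl (fun best c =>
    if i ≥ c ∧ PySem.List.pyGetD dp (i - c) (-1) > best then PySem.List.pyGetD dp (i - c) (-1)
    else best) (-1)

-- loop body: dp.append(best + 1)
def dpStep (dp : List Int) (i : Int) : List Int := dp ++ [dpBest dp i + 1]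

def ropeCut_alt (n : Int) : Int :=
  if n < 0 then -1
  else
    let dp := (PySem.List.pyRange 1 (n + 1) 1).foldl dpStep [0]
    PySem.List.pyGetD dp n (-1)  -- dp[n]; index provably in range (len dp = n+1)

-- ===== PRECONDITION & SPEC =====
-- Pre_ excludes lengths beyond the bound below, where A's recursion depth (about one frame per
-- nine units of length) reaches CPython's default recursion limit and A raises RecursionError
-- instead of returning; B returns normally there.
def Pre_ropeCut (n : Int) : Prop := n < 8900
instance (n : Int) : Decidable (Pre_ropeCut n) := by unfold Pre_ropeCut; infer_instance
def pvWitness_ropeCut : Int := (36)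

def Spec_ropeCut (n : Int) (out : Int) : Prop := out = ropeCut_alt n
instance (n : Int) (out : Int) : Decidable (Spec_ropeCut n out) := by unfold Spec_ropeCut; infer_instance

-- ===== CLAIM (what is proved, stated in full; the proofs are below) =====
def Claim_equal_ropeCut : Prop := ∀ (n : Int), Dom_ropeCut n → Pre_ropeCut n → Spec_ropeCut n (ropeCut n)

-- ===== LEMMAS AND PROOFS =====

-- The common closed value both programs compute for length m ≥ 0.
def pvG (j : Nat) : Int := (j : Int) / 9
def pvDp (m : Nat) : List Int := (List.range m).map pvG

theorem pvDp_getD (m j : Nat) (h : j < m) : (pvDp m).getD j (-1) = (j : Int) / 9 := by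
  have hlen : j < ((List.range m).map pvG).length := by simp [h]
  rw [pvDp, List.getD_eq_getElem _ _ hlen, List.getElem_map, List.getElem_range, pvG]

theorem ropeCut_closed : ∀ (k : Nat) (n : Int), n.toNat = k → ropeCut n = if n < 0 then -1 else n / 9 := by
  intro k
  induction k using Nat.strong_induction_on with
  | _ k ih =>
    intro n hk
    rw [ropeCut]
    by_cases h0 : n = 0
    · simp [h0]
    · rw [if_neg h0]
      by_cases hneg : n < 0
      · simp [hneg]
      · rw [if_neg hneg]
        have h1 : 1 ≤ n := by omega
        rw [ih (n - 11).toNat (by omega) (n - 11) rfl,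
            ih (n - 9).toNat (by omega) (n - 9) rfl,
            ih (n - 12).toNat (by omega) (n - 12) rfl]
        simp only [Int.max_def]
        split_ifs <;> omega

theorem pvBest (k : Nat) : dpBest (pvDp (k + 1)) ((k : Int) + 1) + 1 = ((k : Int) + 1) / 9 := by
  unfold dpBest
  simp only [List.foldl_cons, List.foldl_nil]
  by_cases h9 : (9 : Int) ≤ (k : Int) + 1
  · have e9 : ((k : Int) + 1 - 9) = ((k - 8 : Nat) : Int) := by omega
    rw [e9, PySem.List.pyGetD_natCast, pvDp_getD _ _ (by omega)]
    by_cases h11 : (11 : Int) ≤ (k : Int) + 1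
    · have e11 : ((k : Int) + 1 - 11) = ((k - 10 : Nat) : Int) := by omega
      rw [e11, PySem.List.pyGetD_natCast, pvDp_getD _ _ (by omega)]
      by_cases h12 : (12 : Int) ≤ (k : Int) + 1
      · have e12 : ((k : Int) + 1 - 12) = ((k - 11 : Nat) : Int) := by omega
        rw [e12, PySem.List.pyGetD_natCast, pvDp_getD _ _ (by omega)]
        split_ifs <;> omega
      · split_ifs <;> omega
    · split_ifs <;> omega
  · split_ifs <;> omega

theorem pvFold (k : Nat) :
    (PySem.List.pyRange 1 ((k : Int) + 1) 1).foldl dpStep [0] = pvDp (k + 1) := by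
  induction k with
  | zero =>
    rw [PySem.List.pyRange_one_eq_nil (by norm_num)]
    simp [pvDp, pvG, List.range_succ]
  | succ k ih =>
    have hcast : (((k + 1 : Nat)) : Int) + 1 = ((k : Int) + 1) + 1 := by push_cast; ring
    rw [hcast, PySem.List.pyRange_one_succ_right (by omega), List.foldl_append, ih]
    show dpStep (pvDp (k + 1)) ((k : Int) + 1) = pvDp (k + 2)
    unfold dpStep
    have : pvDp (k + 2) = pvDp (k + 1) ++ [((k + 1 : Nat) : Int) / 9] := by
      simp [pvDp, pvG, List.range_succ]
    rw [this]
    congr 1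
    rw [pvBest]
    push_cast
    ring_nf

theorem ropeCut_alt_closed (n : Int) : ropeCut_alt n = if n < 0 then -1 else n / 9 := by
  unfold ropeCut_alt
  by_cases hneg : n < 0
  · simp [hneg]
  · rw [if_neg hneg, if_neg hneg]
    have hn : n = ((n.toNat : Nat) : Int) := by omega
    rw [hn, pvFold n.toNat, PySem.List.pyGetD_natCast, pvDp_getD _ _ (by omega)]

-- ===== VERDICT (by name: the statement is the Claim_ definition above) =====
theorem ropeCut_spec : Claim_equal_ropeCut := by
  intro n _ _
  unfold Spec_ropeCut
  rw [ropeCut_closed n.toNat n rfl, ropeCut_alt_closed]
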